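-- pv_equiv track=rewrite | github.com/piotrjurkiewicz/generic-dijkstra | eon.py | iterate_continuous_blocks_from_end
-- ===== SOURCE A (Python) =====
-- def iterate_continuous_blocks_from_end(slots_set):
--     while slots_set:
--         end = slots_set.bit_length()
--         powered = (1 << end) - 1
--         start = (slots_set ^ powered).bit_length()
--         new_set = (powered >> start) << start
--         yield (start, end, new_set)
--         slots_set ^= new_set
-- ===== SOURCE B (Python) =====
-- def iterate_continuous_blocks_from_end(slots_set):
--     # Per-bit scan from the top: walk every bit position high-to-low with a
--     # run-state machine instead of leaping block-to-block with xor arithmetic.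
--     end = 0
--     inside = False
--     for i in range(slots_set.bit_length() - 1, -1, -1):
--         bit = (slots_set >> i) & 1
--         if bit and not inside:
--             inside = True
--             end = i + 1
--         elif not bit and inside:
--             inside = False
--             yield (i + 1, end, (1 << end) - (1 << (i + 1)))
--     if inside:
--         yield (0, end, (1 << end) - 1)
-- ===== Notes on version B (the rewrite author's own statement) =====
-- stated objective: alternative
-- what changed: B scans every bit position from the top with an inside-a-run state machine (entering a run records end, leaving one yields the block), instead of A's leaping block-to-block via bit_length/xor/shift arithmetic; Pre_ excludes negative bitmasks, on which A's while-loop yields forever and never returns.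
import Mathlib
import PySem

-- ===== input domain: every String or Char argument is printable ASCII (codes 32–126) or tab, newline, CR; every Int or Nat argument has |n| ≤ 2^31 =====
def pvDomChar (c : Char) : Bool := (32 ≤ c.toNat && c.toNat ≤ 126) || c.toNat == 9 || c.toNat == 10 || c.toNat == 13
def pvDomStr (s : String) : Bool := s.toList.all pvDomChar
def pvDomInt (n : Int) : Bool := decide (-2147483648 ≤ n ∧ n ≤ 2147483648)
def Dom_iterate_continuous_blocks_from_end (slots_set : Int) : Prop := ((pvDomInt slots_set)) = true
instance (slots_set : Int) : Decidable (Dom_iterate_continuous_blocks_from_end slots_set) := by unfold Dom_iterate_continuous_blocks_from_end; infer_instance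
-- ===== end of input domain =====

-- B replaces A's block-to-block leaps (bit_length/xor arithmetic) by a per-bit
-- high-to-low scan with a run-state machine; same tuples, same order (objective: alternative).

-- ===== PORT A =====
-- Python's m.bit_length() for a nonnegative int held as a Nat (the PySem primitive on its cast).
def bl (m : Nat) : Nat := PySem.Int.bitLength (m : Int)

theorem bl_lt_two (m : Nat) : m < 2 ^ bl m := by
  have h := PySem.Int.lt_two_pow_bitLength (m : Int)
  simpa [bl] using h

theorem bl_le_top (m : Nat) (h : m ≠ 0) : 2 ^ (bl m - 1) ≤ m := by
  have h' := PySem.Int.two_pow_bitLength_le (m : Int) (by exact_mod_cast h)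
  simpa [bl] using h'

theorem bl_zero : bl 0 = 0 := by decide

theorem bl_pos (m : Nat) (h : m ≠ 0) : 0 < bl m := by
  rcases Nat.eq_zero_or_pos (bl m) with h0 | h0
  · exfalso
    have h1 := bl_lt_two m
    rw [h0, pow_zero] at h1
    omega
  · exact h0

theorem bl_le_of_lt (m k : Nat) (h : m < 2 ^ k) : bl m ≤ k := by
  by_cases hm : m = 0
  · subst hm; simp [bl_zero]
  · by_contra hlt
    have h1 : 2 ^ k ≤ 2 ^ (bl m - 1) := Nat.pow_le_pow_right (by norm_num) (by omega)
    have h2 := bl_le_top m hm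
    omega

theorem testBit_top (m : Nat) (h : m ≠ 0) : m.testBit (bl m - 1) = true := by
  have h1 : 2 ^ (bl m - 1) ≤ m := bl_le_top m h
  have h2 : m < 2 ^ bl m := bl_lt_two m
  have h3 : 0 < bl m := bl_pos m h
  have hpow : m < 2 * 2 ^ (bl m - 1) := by
    have he : 2 * 2 ^ (bl m - 1) = 2 ^ bl m := by
      rw [mul_comm, ← pow_succ]; congr 1; omega
    omega
  have hp : 0 < 2 ^ (bl m - 1) := Nat.two_pow_pos _
  have hd1 : 1 ≤ m / 2 ^ (bl m - 1) := (Nat.one_le_div_iff hp).mpr h1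
  have hd2 : m / 2 ^ (bl m - 1) < 2 := (Nat.div_lt_iff_lt_mul hp).mpr hpow
  rw [Nat.testBit_eq_decide_div_mod_eq]
  have : m / 2 ^ (bl m - 1) = 1 := by omega
  simp [this]

-- The complement-within-width trick of A: bits of s ^ (2^bl(s)-1).
theorem tbit (s k : Nat) :
    (s ^^^ (2 ^ bl s - 1)).testBit k = (decide (k < bl s) && !(s.testBit k)) := by
  rw [Nat.testBit_xor, Nat.testBit_two_pow_sub_one]
  by_cases hk : k < bl s
  · simp [hk, Bool.xor_comm]
  · have hs : s.testBit k = false :=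
      Nat.testBit_lt_two_pow (lt_of_lt_of_le (bl_lt_two s)
        (Nat.pow_le_pow_right (by norm_num) (Nat.le_of_not_lt hk)))
    simp [hk, hs]

theorem st_lt (s : Nat) (hs : s ≠ 0) : bl (s ^^^ (2 ^ bl s - 1)) < bl s := by
  have htlt : s ^^^ (2 ^ bl s - 1) < 2 ^ bl s := by
    refine Nat.xor_lt_two_pow (bl_lt_two s) ?_
    have := Nat.two_pow_pos (bl s)
    omega
  have hle : bl (s ^^^ (2 ^ bl s - 1)) ≤ bl s := bl_le_of_lt _ _ htlt
  have hn : 0 < bl s := bl_pos s hs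
  rcases eq_or_lt_of_le hle with heq | hlt
  · exfalso
    have htne : s ^^^ (2 ^ bl s - 1) ≠ 0 := by
      intro h0
      rw [h0, bl_zero] at heq
      omega
    have h1 := testBit_top _ htne
    rw [tbit, heq] at h1
    have h2 := testBit_top s hs
    simp [h2, Nat.sub_lt hn] at h1
  · exact hlt

theorem run_bits (s k : Nat) (h1 : bl (s ^^^ (2 ^ bl s - 1)) ≤ k) (h2 : k < bl s) :
    s.testBit k = true := by
  have hf : (s ^^^ (2 ^ bl s - 1)).testBit k = false :=
    Nat.testBit_lt_two_pow (lt_of_lt_of_le (bl_lt_two _)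
      (Nat.pow_le_pow_right (by norm_num) h1))
  rw [tbit] at hf
  simpa [h2] using hf



theorem xor_new (s : Nat) (_hs : s ≠ 0) :
    s ^^^ ((2 ^ bl s - 1) >>> bl (s ^^^ (2 ^ bl s - 1))) <<< bl (s ^^^ (2 ^ bl s - 1)) =
      s % 2 ^ bl (s ^^^ (2 ^ bl s - 1)) := by
  apply Nat.eq_of_testBit_eq
  intro k
  rw [Nat.testBit_xor, Nat.testBit_mod_two_pow, Nat.testBit_shiftLeft, Nat.testBit_shiftRight]
  by_cases hk1 : k < bl (s ^^^ (2 ^ bl s - 1))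
  · simp [hk1, show ¬ bl (s ^^^ (2 ^ bl s - 1)) ≤ k by omega]
  · have hk1' : bl (s ^^^ (2 ^ bl s - 1)) ≤ k := Nat.le_of_not_lt hk1
    have harg : bl (s ^^^ (2 ^ bl s - 1)) + (k - bl (s ^^^ (2 ^ bl s - 1))) = k := by omega
    rw [harg, Nat.testBit_two_pow_sub_one]
    by_cases hk2 : k < bl s
    · have hb := run_bits s k hk1' hk2
      simp [hk1, hk1', hk2, hb]
    · have hsf : s.testBit k = false :=
        Nat.testBit_lt_two_pow (lt_of_lt_of_le (bl_lt_two s)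
          (Nat.pow_le_pow_right (by norm_num) (Nat.le_of_not_lt hk2)))
      simp [hk1, hk1', hk2, hsf]

-- Termination of A's loop: xor-ing out the top block strictly decreases s.
theorem goA_dec (s : Nat) (hs : s ≠ 0) :
    s ^^^ ((2 ^ bl s - 1) >>> bl (s ^^^ (2 ^ bl s - 1))) <<< bl (s ^^^ (2 ^ bl s - 1)) < s := by
  rw [xor_new s hs]
  have h1 : bl (s ^^^ (2 ^ bl s - 1)) ≤ bl s - 1 := by
    have := st_lt s hs
    omega
  have h2 : 2 ^ bl (s ^^^ (2 ^ bl s - 1)) ≤ s :=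
    le_trans (Nat.pow_le_pow_right (by norm_num) h1) (bl_le_top s hs)
  exact lt_of_lt_of_le (Nat.mod_lt s (Nat.two_pow_pos _)) h2

-- A's while-loop, step for step (s nonnegative, held as a Nat; Nat's ^^^ / << / >> are
-- Python's bit ops on nonnegative ints, bl is bit_length, 2^e - 1 is (1 << e) - 1).
def goA (s : Nat) : List (Int × Int × Int) :=
  if hs : s = 0 then []
  else
    let e := bl s
    let powered := 2 ^ e - 1
    let start := bl (s ^^^ powered)
    let new_set := (powered >>> start) <<< start
    ((start : Int), (e : Int), (new_set : Int)) :: goA (s ^^^ new_set)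
termination_by s
decreasing_by exact goA_dec s hs

-- A loops forever on a negative argument (Pre_ excludes those inputs), so the port
-- returns [] there; on nonnegative input this is A's loop verbatim.
def iterate_continuous_blocks_from_end (slots_set : Int) : List (Int × Int × Int) :=
  if slots_set < 0 then [] else goA slots_set.toNat

-- ===== PORT B =====
-- B's for-loop over bit positions i = n-1 … 0 (fuel = i+1), state (inside, end);
-- s / 2^i % 2 is (slots_set >> i) & 1, (2:Int)^k is 1 << k.
def goB (s : Nat) : Nat → Bool → Nat → List (Int × Int × Int)
  | 0, inside, e => if inside then [((0 : Int), (e : Int), (2 : Int) ^ e - 1)] else []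
  | i + 1, inside, e =>
    if s / 2 ^ i % 2 = 1 ∧ inside = false then goB s i true (i + 1)
    else if ¬ s / 2 ^ i % 2 = 1 ∧ inside = true then
      (((i : Int) + 1), (e : Int), (2 : Int) ^ e - 2 ^ (i + 1)) :: goB s i false e
    else goB s i inside e

def iterate_continuous_blocks_from_end_alt (slots_set : Int) : List (Int × Int × Int) :=
  if slots_set < 0 then [] else goB slots_set.toNat (bl slots_set.toNat) false 0

-- ===== PRECONDITION & SPEC =====
-- Pre_ excludes negative bitmasks: there A's `while slots_set:` never terminates (the
-- xor-ed out new_set is 0 for a negative int), so A yields forever and returns no finite value.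
def Pre_iterate_continuous_blocks_from_end (slots_set : Int) : Prop := 0 ≤ slots_set
instance (slots_set : Int) : Decidable (Pre_iterate_continuous_blocks_from_end slots_set) := by
  unfold Pre_iterate_continuous_blocks_from_end; infer_instance

def pvWitness_iterate_continuous_blocks_from_end : Int := 13

def Spec_iterate_continuous_blocks_from_end (slots_set : Int) (out : List (Int × Int × Int)) : Prop :=
  out = iterate_continuous_blocks_from_end_alt slots_set
instance (slots_set : Int) (out : List (Int × Int × Int)) :
    Decidable (Spec_iterate_continuous_blocks_from_end slots_set out) := by
  unfold Spec_iterate_continuous_blocks_from_end; infer_instance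

-- ===== CLAIM (what is proved, stated in full; the proofs are below) =====
def Claim_equal_iterate_continuous_blocks_from_end : Prop :=
  ∀ (slots_set : Int), Dom_iterate_continuous_blocks_from_end slots_set →
    Pre_iterate_continuous_blocks_from_end slots_set →
    Spec_iterate_continuous_blocks_from_end slots_set (iterate_continuous_blocks_from_end slots_set)

-- ===== LEMMAS AND PROOFS =====

theorem low_bit (s : Nat) (hs : s ≠ 0) (hpos : 0 < bl (s ^^^ (2 ^ bl s - 1))) :
    s.testBit (bl (s ^^^ (2 ^ bl s - 1)) - 1) = false := by
  have htne : s ^^^ (2 ^ bl s - 1) ≠ 0 := by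
    intro h0
    rw [h0, bl_zero] at hpos
    omega
  have h1 := testBit_top _ htne
  have h2 : bl (s ^^^ (2 ^ bl s - 1)) - 1 < bl s := by
    have := st_lt s hs
    omega
  rw [tbit] at h1
  simpa [h2] using h1

-- A's new_set in closed form: ((2^n-1) >> st) << st = 2^n - 2^st  (st ≤ n).
theorem new_shift_eq (n st : Nat) (h : st ≤ n) :
    ((2 ^ n - 1) >>> st) <<< st = 2 ^ n - 2 ^ st := by
  rw [Nat.shiftRight_eq_div_pow, Nat.shiftLeft_eq]
  have hmul : 2 ^ (n - st) * 2 ^ st = 2 ^ n := by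
    rw [← pow_add]; congr 1; omega
  have h1 : 1 ≤ 2 ^ st := Nat.one_le_two_pow
  have h2 : 1 ≤ 2 ^ (n - st) := Nat.one_le_two_pow
  have h3 : 2 ^ st ≤ 2 ^ n := Nat.pow_le_pow_right (by norm_num) h
  have e1 : (2 ^ (n - st) - 1) * 2 ^ st = 2 ^ n - 2 ^ st := by
    rw [Nat.sub_mul, one_mul, hmul]
  have hdiv : (2 ^ n - 1) / 2 ^ st = 2 ^ (n - st) - 1 := by
    apply Nat.div_eq_of_lt_le
    · rw [e1]; omega
    · have : (2 ^ (n - st) - 1 + 1) * 2 ^ st = 2 ^ n := by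
        rw [Nat.sub_add_cancel h2, hmul]
      omega
  rw [hdiv, e1]

theorem div_mod_two (m i : Nat) : m / 2 ^ i % 2 = if m.testBit i then 1 else 0 := by
  rw [Nat.testBit_eq_decide_div_mod_eq]
  rcases Nat.mod_two_eq_zero_or_one (m / 2 ^ i) with h | h <;> simp [h]

theorem lt_pow_of_testBit_false (x k : Nat) (h1 : x < 2 ^ (k + 1)) (h2 : x.testBit k = false) :
    x < 2 ^ k := by
  by_contra hx
  have hx' : 2 ^ k ≤ x := Nat.le_of_not_lt hx
  have hp : 0 < 2 ^ k := Nat.two_pow_pos _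
  have hd1 : 1 ≤ x / 2 ^ k := (Nat.one_le_div_iff hp).mpr hx'
  have hd2 : x / 2 ^ k < 2 := by
    refine (Nat.div_lt_iff_lt_mul hp).mpr ?_
    have he : 2 * 2 ^ k = 2 ^ (k + 1) := by rw [mul_comm, ← pow_succ]
    omega
  rw [Nat.testBit_eq_decide_div_mod_eq] at h2
  have : x / 2 ^ k = 1 := by omega
  simp [this] at h2

-- In the not-inside state `end` is dead: it is overwritten on entry and only read while inside.
theorem goB_false_e (s : Nat) (i : Nat) (e e' : Nat) : goB s i false e = goB s i false e' := by
  induction i generalizing e e' with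
  | zero => simp [goB]
  | succ i ih => by_cases h : s / 2 ^ i % 2 = 1 <;> simp [goB, h, ih e e']

-- The scan with fuel i only reads bits below i.
theorem goB_congr (s s' i : Nat) (ins : Bool) (e : Nat) (h : s % 2 ^ i = s' % 2 ^ i) :
    goB s i ins e = goB s' i ins e := by
  induction i generalizing ins e with
  | zero => simp [goB]
  | succ i ih =>
    have h1 : s.testBit i = s'.testBit i := by
      have hc := congrArg (fun x => Nat.testBit x i) h
      simpa [Nat.testBit_mod_two_pow] using hc
    have hb : s / 2 ^ i % 2 = s' / 2 ^ i % 2 := by rw [div_mod_two, div_mod_two, h1]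
    have hrec : s % 2 ^ i = s' % 2 ^ i := by
      have d : (2 : Nat) ^ i ∣ 2 ^ (i + 1) := pow_dvd_pow 2 (Nat.le_succ i)
      rw [← Nat.mod_mod_of_dvd s d, ← Nat.mod_mod_of_dvd s' d, h]
    by_cases hbit : s' / 2 ^ i % 2 = 1 <;> cases ins <;>
      simp [goB, hb, hbit, ih _ _ hrec]

-- Bits above bit_length are zero and are skipped in the not-inside state.
theorem goB_skip (s i e : Nat) (h : bl s ≤ i) : goB s i false e = goB s (bl s) false e := by
  induction i with
  | zero =>
    have h0 : bl s = 0 := by omega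
    rw [h0]
  | succ i ih =>
    rcases eq_or_lt_of_le h with heq | hlt
    · rw [heq]
    · have hb : s.testBit i = false :=
        Nat.testBit_lt_two_pow (lt_of_lt_of_le (bl_lt_two s)
          (Nat.pow_le_pow_right (by norm_num) (by omega)))
      have hbit : s / 2 ^ i % 2 = 0 := by rw [div_mod_two, hb]; simp
      simp only [goB, hbit]
      rw [if_neg (by simp), if_neg (by simp)]
      exact ih (by omega)

-- Inside a run of set bits the scan only decrements i.
theorem goB_run (s st j n : Nat) (hj : st ≤ j) (hjn : j ≤ n)
    (hbits : ∀ k, st ≤ k → k < n → s.testBit k = true) :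
    goB s j true n = goB s st true n := by
  induction j with
  | zero =>
    have h0 : st = 0 := by omega
    rw [h0]
  | succ j ih =>
    rcases eq_or_lt_of_le hj with heq | hlt
    · rw [heq]
    · have hb : s.testBit j = true := hbits j (by omega) (by omega)
      have hbit : s / 2 ^ j % 2 = 1 := by rw [div_mod_two, hb]; simp
      simp only [goB, hbit]
      rw [if_neg (by simp), if_neg (by simp)]
      exact ih (by omega) (by omega)

-- One unfolding of A's loop.
theorem goA_step (s : Nat) (hs : s ≠ 0) :
    goA s = ((bl (s ^^^ (2 ^ bl s - 1)) : Int), (bl s : Int),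
        ((((2 ^ bl s - 1) >>> bl (s ^^^ (2 ^ bl s - 1))) <<< bl (s ^^^ (2 ^ bl s - 1)) : Nat) : Int)) ::
      goA (s ^^^ ((2 ^ bl s - 1) >>> bl (s ^^^ (2 ^ bl s - 1))) <<< bl (s ^^^ (2 ^ bl s - 1))) := by
  rw [goA]
  simp [hs]

-- Main invariant: the full scan from bit_length with a clean state equals A's loop.
theorem goB_eq_goA (s : Nat) : ∀ e : Nat, goB s (bl s) false e = goA s := by
  induction s using Nat.strong_induction_on with
  | _ s ih =>
    intro e
    by_cases hs : s = 0
    · subst hs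
      rw [bl_zero, goA]
      simp [goB]
    · set n := bl s with hn
      set st := bl (s ^^^ (2 ^ n - 1)) with hst
      have fold1 : bl s = n := rfl
      have fold2 : bl (s ^^^ (2 ^ n - 1)) = st := rfl
      have hstn : st < n := st_lt s hs
      have hn1 : 0 < n := bl_pos s hs
      obtain ⟨m, hm⟩ : ∃ m, n = m + 1 := ⟨n - 1, by omega⟩
      have htop : s.testBit m = true := by
        have h := testBit_top s hs
        rw [fold1, hm] at h
        simpa using h
      have hbit1 : s / 2 ^ m % 2 = 1 := by rw [div_mod_two, htop]; simp
      have step1 : goB s n false e = goB s m true n := by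
        rw [hm]
        simp only [goB]
        rw [if_pos (by simp [hbit1]), ← hm]
      have step2 : goB s m true n = goB s st true n :=
        goB_run s st m n (by omega) (by omega) (fun k hk1 hk2 => run_bits s k hk1 hk2)
      have hA := goA_step s hs
      rw [fold1, fold2] at hA
      have hnewval : (((2 ^ n - 1) >>> st) <<< st : Nat) = 2 ^ n - 2 ^ st :=
        new_shift_eq n st (le_of_lt hstn)
      have hxor : s ^^^ ((2 ^ n - 1) >>> st) <<< st = s % 2 ^ st := xor_new s hs
      have hcastI : ((((2 ^ n - 1) >>> st) <<< st : Nat) : Int) = (2 : Int) ^ n - 2 ^ st := by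
        rw [hnewval]
        have h2 : (2 : Nat) ^ st ≤ 2 ^ n := Nat.pow_le_pow_right (by norm_num) (le_of_lt hstn)
        push_cast [h2]
        ring
      cases hstc : st with
      | zero =>
        have hB : goB s 0 true n = [((0 : Int), (n : Int), (2 : Int) ^ n - 1)] := by simp [goB]
        have hxor0 : s ^^^ ((2 ^ n - 1) >>> st) <<< st = 0 := by
          rw [hxor, hstc, pow_zero, Nat.mod_one]
        rw [step1, step2, hstc, hB, hA, hxor0, goA]
        rw [hcastI, hstc]
        norm_num
      | succ m2 =>
        have hlow : s.testBit m2 = false := by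
          have h := low_bit s hs (by rw [fold2, hstc]; omega)
          rw [fold2, hstc] at h
          simpa using h
        have hbit0 : s / 2 ^ m2 % 2 = 0 := by rw [div_mod_two, hlow]; simp
        have step3 : goB s (m2 + 1) true n =
            (((m2 : Int) + 1), (n : Int), (2 : Int) ^ n - 2 ^ (m2 + 1)) :: goB s m2 false n := by
          simp only [goB]
          rw [if_neg (by simp [hbit0]), if_pos (by simp [hbit0])]
        have hmods : s % 2 ^ m2 = s % 2 ^ st % 2 ^ m2 := by
          rw [hstc]
          exact (Nat.mod_mod_of_dvd s (pow_dvd_pow 2 (Nat.le_succ m2))).symm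
        have hbl' : bl (s % 2 ^ st) ≤ m2 := by
          apply bl_le_of_lt
          apply lt_pow_of_testBit_false
          · rw [hstc]
            exact Nat.mod_lt s (Nat.two_pow_pos _)
          · rw [Nat.testBit_mod_two_pow, hlow]
            simp
        have hlt : s % 2 ^ st < s := by
          have h1 : 2 ^ st ≤ s := by
            refine le_trans (Nat.pow_le_pow_right (by norm_num) (show st ≤ n - 1 by omega)) ?_
            exact bl_le_top s hs
          exact lt_of_lt_of_le (Nat.mod_lt s (Nat.two_pow_pos _)) h1
        have step4 : goB s m2 false n = goA (s % 2 ^ st) := by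
          rw [goB_congr s (s % 2 ^ st) m2 false n hmods,
              goB_skip (s % 2 ^ st) m2 n hbl',
              goB_false_e (s % 2 ^ st) _ n 0]
          exact ih (s % 2 ^ st) hlt 0
        rw [hxor, hcastI] at hA
        rw [step1, step2, hstc, step3, step4, hA, hstc]
        push_cast
        norm_num

-- ===== VERDICT (by name: the statement is the Claim_ definition above) =====
theorem iterate_continuous_blocks_from_end_spec : Claim_equal_iterate_continuous_blocks_from_end := by
  intro slots_set hdom hpre
  unfold Spec_iterate_continuous_blocks_from_end
  unfold iterate_continuous_blocks_from_end iterate_continuous_blocks_from_end_alt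
  have hneg : ¬ slots_set < 0 := not_lt.mpr hpre
  rw [if_neg hneg, if_neg hneg]
  exact (goB_eq_goA slots_set.toNat 0).symm
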